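-- pv_equiv track=rewrite | github.com/odylith/odylith | src/odylith/runtime/context_engine/execution_engine_handshake.py | _target_component_status
-- ===== SOURCE A (Python) =====
-- from typing import Any
-- from typing import Sequence
--
-- CANONICAL_EXECUTION_ENGINE_COMPONENT_ID = "execution-engine"
--
-- NONCANONICAL_EXECUTION_ENGINE_COMPONENT_IDS = frozenset(
--     {
--         "execution-governance",
--         "execution_governance",
--     }
-- )
--
-- def _string(value: Any) -> str:
--     return str(value or "").strip()
--
-- def _component_key(value: Any) -> str:
--     return _string(value).lower().replace("_", "-")
--
-- def _target_component_status(component_ids: Sequence[str]) -> str: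
--     keys = {_component_key(token) for token in component_ids if _string(token)}
--     if not keys:
--         return "missing"
--     if keys.intersection(NONCANONICAL_EXECUTION_ENGINE_COMPONENT_IDS):
--         return "blocked_noncanonical_execution_engine"
--     if CANONICAL_EXECUTION_ENGINE_COMPONENT_ID in keys:
--         return "execution_engine" if len(keys) == 1 else "execution_engine_plus_related"
--     return "other_component"
-- ===== SOURCE B (Python) =====
-- CANONICAL_EXECUTION_ENGINE_COMPONENT_ID = "execution-engine"
--
-- NONCANONICAL_EXECUTION_ENGINE_COMPONENT_IDS = frozenset(
--     {
--         "execution-governance",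
--         "execution_governance",
--     }
-- )
--
-- def _target_component_status(component_ids):
--     saw_any = saw_noncanonical = saw_canonical = saw_other = False
--     for token in component_ids:
--         stripped = str(token or "").strip()
--         if not stripped:
--             continue
--         key = stripped.lower().replace("_", "-")
--         saw_any = True
--         if key in NONCANONICAL_EXECUTION_ENGINE_COMPONENT_IDS:
--             saw_noncanonical = True
--         elif key == CANONICAL_EXECUTION_ENGINE_COMPONENT_ID:
--             saw_canonical = True
--         else:
--             saw_other = True
--     if not saw_any:
--         return "missing"
--     if saw_noncanonical:
--         return "blocked_noncanonical_execution_engine"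
--     if saw_canonical:
--         return "execution_engine_plus_related" if saw_other else "execution_engine"
--     return "other_component"
-- ===== Notes on version B (the rewrite author's own statement) =====
-- stated objective: simpler
-- what changed: Replaces A's build-a-distinct-key-set and then set intersection/membership/cardinality tests by one pass over the tokens maintaining four booleans (saw_any/saw_noncanonical/saw_canonical/saw_other); the len(keys)==1 test becomes the saw_other flag and no set is ever built.
import Mathlib
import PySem

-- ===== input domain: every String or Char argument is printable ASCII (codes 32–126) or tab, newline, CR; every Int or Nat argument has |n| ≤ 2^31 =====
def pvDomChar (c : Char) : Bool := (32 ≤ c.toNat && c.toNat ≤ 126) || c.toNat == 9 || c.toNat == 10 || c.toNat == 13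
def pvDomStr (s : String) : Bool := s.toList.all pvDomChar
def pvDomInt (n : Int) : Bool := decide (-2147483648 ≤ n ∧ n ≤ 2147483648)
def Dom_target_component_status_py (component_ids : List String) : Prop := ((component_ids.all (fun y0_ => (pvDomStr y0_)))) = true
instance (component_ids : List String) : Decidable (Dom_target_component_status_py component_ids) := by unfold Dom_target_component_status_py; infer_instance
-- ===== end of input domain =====

-- B replaces A's distinct-key set (and its intersection/membership/cardinality tests) by a
-- single pass keeping four booleans; objective: simpler.

-- ===== PORT A =====
-- _string(token) on a str argument is str(token or "").strip() = token.strip()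
def pvStringA (value : String) : String := PySem.Str.strip value

-- _component_key: _string(value).lower().replace("_", "-")
def pvComponentKeyA (value : String) : String :=
  PySem.Str.replace (PySem.Str.lower (pvStringA value)) "_" "-"

def pvNoncanonicalIds : List String := ["execution-governance", "execution_governance"]

def target_component_status_py (component_ids : List String) : String :=
  -- keys = {_component_key(token) for token in component_ids if _string(token)}
  let keys : PySem.Set String :=
    PySem.Set.ofList ((component_ids.filter (fun token => pvStringA token ≠ "")).map pvComponentKeyA)
  if keys = [] then "missing"
  else if PySem.Set.inter keys pvNoncanonicalIds ≠ [] then "blocked_noncanonical_execution_engine"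
  else if PySem.Set.contains keys "execution-engine" then
    (if PySem.Set.len keys = 1 then "execution_engine" else "execution_engine_plus_related")
  else "other_component"

-- ===== PORT B =====
-- state: (saw_any, saw_noncanonical, saw_canonical, saw_other)
def pvStepB (st : Bool × Bool × Bool × Bool) (token : String) : Bool × Bool × Bool × Bool :=
  let stripped := PySem.Str.strip token
  if stripped = "" then st
  else
    let key := PySem.Str.replace (PySem.Str.lower stripped) "_" "-"
    if key = "execution-governance" ∨ key = "execution_governance" then
      (true, true, st.2.2.1, st.2.2.2)
    else if key = "execution-engine" then
      (true, st.2.1, true, st.2.2.2)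
    else
      (true, st.2.1, st.2.2.1, true)

def target_component_status_py_alt (component_ids : List String) : String :=
  let st := component_ids.foldl pvStepB (false, false, false, false)
  if st.1 = false then "missing"
  else if st.2.1 then "blocked_noncanonical_execution_engine"
  else if st.2.2.1 then
    (if st.2.2.2 then "execution_engine_plus_related" else "execution_engine")
  else "other_component"

-- ===== PRECONDITION & SPEC =====
def Spec_target_component_status_py (component_ids : List String) (out : String) : Prop := out = target_component_status_py_alt component_ids
instance (component_ids : List String) (out : String) : Decidable (Spec_target_component_status_py component_ids out) := by unfold Spec_target_component_status_py; infer_instance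

-- ===== CLAIM (what is proved, stated in full; the proofs are below) =====
def Claim_equal_target_component_status_py : Prop := ∀ (component_ids : List String), Dom_target_component_status_py component_ids → Spec_target_component_status_py component_ids (target_component_status_py component_ids)

-- ===== LEMMAS AND PROOFS =====

-- the list of keys of the non-blank tokens (shared vocabulary of the proof)
def pvKeys (component_ids : List String) : List String :=
  (component_ids.filter (fun token => pvStringA token ≠ "")).map pvComponentKeyA

def pvIsNon (k : String) : Bool := k = "execution-governance" ∨ k = "execution_governance"

def pvIsOther (k : String) : Bool := ¬ pvIsNon k ∧ k ≠ "execution-engine"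

-- B's fold computes the four any-style predicates over pvKeys
lemma pvStepB_fold (cs : List String) (st : Bool × Bool × Bool × Bool) :
    cs.foldl pvStepB st =
      (st.1 || !(pvKeys cs).isEmpty,
       st.2.1 || (pvKeys cs).any pvIsNon,
       st.2.2.1 || (pvKeys cs).any (· = "execution-engine"),
       st.2.2.2 || (pvKeys cs).any pvIsOther) := by
  induction cs generalizing st with
  | nil => simp [pvKeys]
  | cons t cs ih =>
    rw [List.foldl_cons, ih]
    by_cases hb : PySem.Str.strip t = ""
    · have hK : pvKeys (t :: cs) = pvKeys cs := by
        simp [pvKeys, pvStringA, hb]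
      have hs : pvStepB st t = st := by simp [pvStepB, hb]
      rw [hK, hs]
    · have hK : pvKeys (t :: cs) = pvComponentKeyA t :: pvKeys cs := by
        simp [pvKeys, pvStringA, hb]
      rw [hK]
      by_cases hn : pvComponentKeyA t = "execution-governance" ∨ pvComponentKeyA t = "execution_governance"
      · have hs : pvStepB st t = (true, true, st.2.2.1, st.2.2.2) := by
          simp only [pvComponentKeyA, pvStringA] at hn
          simp [pvStepB, hb, hn]
        have h1 : pvIsNon (pvComponentKeyA t) = true := by
          simp only [pvIsNon, decide_eq_true_eq]; tauto
        have h2 : (pvComponentKeyA t = "execution-engine") = False := by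
          rcases hn with h | h <;> simp [h]
        have h3 : pvIsOther (pvComponentKeyA t) = false := by
          simp [pvIsOther, h1]
        rw [hs]
        simp [List.any_cons, h1, h2, h3]
      · rw [not_or] at hn
        by_cases hc : pvComponentKeyA t = "execution-engine"
        · have hs : pvStepB st t = (true, st.2.1, true, st.2.2.2) := by
            simp only [pvComponentKeyA, pvStringA] at hn hc
            simp [pvStepB, hb, hc]
          rw [hs]
          simp [List.any_cons, hc, pvIsNon, pvIsOther]
        · have hs : pvStepB st t = (true, st.2.1, st.2.2.1, true) := by
            simp only [pvComponentKeyA, pvStringA] at hn hc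
            simp [pvStepB, hb, hn.1, hn.2, hc]
          have h1 : pvIsNon (pvComponentKeyA t) = false := by
            simp [pvIsNon, hn.1, hn.2]
          have h3 : pvIsOther (pvComponentKeyA t) = true := by
            simp [pvIsOther, pvIsNon, hn.1, hn.2, hc]
          rw [hs]
          simp [List.any_cons, h1, hc, h3]

-- with the canonical key present, the distinct-key set has one element iff every key is canonical
lemma pv_len_one_iff (L : List String) (hc : "execution-engine" ∈ L) :
    (PySem.Set.ofList L).length = 1 ↔ ∀ k ∈ L, k = "execution-engine" := by
  constructor
  · intro h1 k hk
    obtain ⟨x, hx⟩ := List.length_eq_one_iff.mp h1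
    have hcx : "execution-engine" ∈ PySem.Set.ofList L := (PySem.Set.mem_ofList L _).mpr hc
    have hkx : k ∈ PySem.Set.ofList L := (PySem.Set.mem_ofList L _).mpr hk
    rw [hx] at hcx hkx
    simp at hcx hkx; rw [hkx, hcx]
  · intro hall
    have hnd := PySem.Set.nodup_ofList (xs := L)
    have hmem : ∀ x ∈ PySem.Set.ofList L, x = "execution-engine" := by
      intro x hx; exact hall x ((PySem.Set.mem_ofList L _).mp hx)
    have hne : PySem.Set.ofList L ≠ [] := by
      intro h
      have := (PySem.Set.mem_ofList L _).mpr hc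
      rw [h] at this; simp at this
    match hS : PySem.Set.ofList L with
    | [] => exact absurd hS hne
    | [x] => rfl
    | x :: y :: rest =>
      rw [hS] at hnd hmem
      have hx := hmem x (by simp)
      have hy := hmem y (by simp)
      simp [hx, hy] at hnd

-- A's set-based decision equals B's flag-based decision, over any key list L
lemma pv_final (L : List String) :
    (if PySem.Set.ofList L = [] then "missing"
     else if PySem.Set.inter (PySem.Set.ofList L) pvNoncanonicalIds ≠ [] then "blocked_noncanonical_execution_engine"
     else if PySem.Set.contains (PySem.Set.ofList L) "execution-engine" then
       (if PySem.Set.len (PySem.Set.ofList L) = 1 then "execution_engine" else "execution_engine_plus_related")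
     else "other_component")
    =
    (if (!L.isEmpty) = false then "missing"
     else if L.any pvIsNon then "blocked_noncanonical_execution_engine"
     else if L.any (· = "execution-engine") then
       (if L.any pvIsOther then "execution_engine_plus_related" else "execution_engine")
     else "other_component") := by
  by_cases hE : L = []
  · simp [hE, PySem.Set.ofList]
  · have hne : PySem.Set.ofList L ≠ [] := by
      obtain ⟨x, hx⟩ := List.exists_mem_of_ne_nil L hE
      intro h
      have := (PySem.Set.mem_ofList L x).mpr hx
      rw [h] at this; simp at this
    have hB1 : ¬ ((!L.isEmpty) = false) := by simp [hE]
    rw [if_neg hne, if_neg hB1]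
    by_cases hN : L.any pvIsNon = true
    · have hint : PySem.Set.inter (PySem.Set.ofList L) pvNoncanonicalIds ≠ [] := by
        obtain ⟨k, hk, hkn⟩ := List.any_eq_true.mp hN
        have hmem : k ∈ PySem.Set.inter (PySem.Set.ofList L) pvNoncanonicalIds := by
          rw [PySem.Set.mem_inter]
          refine ⟨(PySem.Set.mem_ofList L k).mpr hk, ?_⟩
          simp only [pvIsNon, decide_eq_true_eq] at hkn
          rcases hkn with h | h <;> simp [pvNoncanonicalIds, h]
        intro h; rw [h] at hmem; simp at hmem
      rw [if_pos hint, if_pos hN]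
    · have hint : PySem.Set.inter (PySem.Set.ofList L) pvNoncanonicalIds = [] := by
        rw [List.eq_nil_iff_forall_not_mem]
        intro k hk
        rw [PySem.Set.mem_inter] at hk
        obtain ⟨hk1, hk2⟩ := hk
        have hkL : k ∈ L := (PySem.Set.mem_ofList L k).mp hk1
        refine hN (List.any_eq_true.mpr ⟨k, hkL, ?_⟩)
        simp only [pvNoncanonicalIds, List.mem_cons, List.not_mem_nil, or_false] at hk2
        simp only [pvIsNon, decide_eq_true_eq]; tauto
      have hA2 : ¬ (PySem.Set.inter (PySem.Set.ofList L) pvNoncanonicalIds ≠ []) := fun h => h hint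
      rw [if_neg hA2, if_neg hN]
      by_cases hC : "execution-engine" ∈ L
      · rw [if_pos ((PySem.Set.contains_iff _ _).mpr ((PySem.Set.mem_ofList L _).mpr hC)),
            if_pos (List.any_eq_true.mpr ⟨_, hC, by simp⟩)]
        by_cases hO : L.any pvIsOther = true
        · have hlen : (PySem.Set.ofList L).length ≠ 1 := by
            intro h1
            obtain ⟨k, hk, hko⟩ := List.any_eq_true.mp hO
            simp only [pvIsOther, decide_eq_true_eq] at hko
            exact hko.2 ((pv_len_one_iff L hC).mp h1 k hk)
          have hlenI : ¬ (((PySem.Set.ofList L).length : Int) = 1) := by exact_mod_cast hlen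
          rw [PySem.Set.len]
          rw [if_neg hlenI, if_pos hO]
        · have hall : ∀ k ∈ L, k = "execution-engine" := by
            intro k hk
            by_contra hkne
            have hkn : pvIsNon k = false := by
              by_contra h
              exact hN (List.any_eq_true.mpr ⟨k, hk, by simpa using h⟩)
            refine hO (List.any_eq_true.mpr ⟨k, hk, ?_⟩)
            simp only [pvIsOther, decide_eq_true_eq]
            refine ⟨by simp [hkn], hkne⟩
          have hlenI : (((PySem.Set.ofList L).length : Int) = 1) := by
            exact_mod_cast (pv_len_one_iff L hC).mpr hall
          rw [PySem.Set.len]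
          rw [if_pos hlenI, if_neg hO]
      · have hcont : ¬ PySem.Set.contains (PySem.Set.ofList L) "execution-engine" = true := by
          intro h
          exact hC ((PySem.Set.mem_ofList L _).mp ((PySem.Set.contains_iff _ _).mp h))
        have hanyC : ¬ L.any (· = "execution-engine") = true := by
          intro h
          obtain ⟨k, hk, hkc⟩ := List.any_eq_true.mp h
          simp only [decide_eq_true_eq] at hkc
          rw [hkc] at hk; exact hC hk
        rw [if_neg hcont, if_neg hanyC]

-- ===== VERDICT (by name: the statement is the Claim_ definition above) =====
theorem target_component_status_py_spec : Claim_equal_target_component_status_py := by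
  intro cs _
  unfold Spec_target_component_status_py target_component_status_py target_component_status_py_alt
  rw [pvStepB_fold]
  simp only [Bool.false_or]
  exact pv_final (pvKeys cs)
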